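-- pv_equiv track=rewrite | github.com/l3t-it-be/automation | requests_library/scripts/parse_json/count_users_messages_in_json.py | sort_dict_by_value
-- ===== SOURCE A (Python) =====
-- def sort_dict_by_value(input_dict):
--     sorted_dict = {
--         key: value
--         for key, value in sorted(
--             input_dict.items(), key=lambda item: (-item[1], item[0])
--         )
--     }
--     return sorted_dict
-- ===== SOURCE B (Python) =====
-- def sort_dict_by_value(input_dict):
--     buckets = {}
--     for key, value in input_dict.items():
--         buckets.setdefault(value, []).append(key)
--     result = {}
--     for value in sorted(buckets, reverse=True):
--         for key in sorted(buckets[value]):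
--             result[key] = value
--     return result
-- ===== Notes on version B (the rewrite author's own statement) =====
-- stated objective: alternative
-- what changed: A does one composite-key sort of all items by (-value, key); B instead groups keys into per-value buckets with a dict, sorts the distinct values descending and the keys inside each bucket ascending, and concatenates the buckets.
import Mathlib
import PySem

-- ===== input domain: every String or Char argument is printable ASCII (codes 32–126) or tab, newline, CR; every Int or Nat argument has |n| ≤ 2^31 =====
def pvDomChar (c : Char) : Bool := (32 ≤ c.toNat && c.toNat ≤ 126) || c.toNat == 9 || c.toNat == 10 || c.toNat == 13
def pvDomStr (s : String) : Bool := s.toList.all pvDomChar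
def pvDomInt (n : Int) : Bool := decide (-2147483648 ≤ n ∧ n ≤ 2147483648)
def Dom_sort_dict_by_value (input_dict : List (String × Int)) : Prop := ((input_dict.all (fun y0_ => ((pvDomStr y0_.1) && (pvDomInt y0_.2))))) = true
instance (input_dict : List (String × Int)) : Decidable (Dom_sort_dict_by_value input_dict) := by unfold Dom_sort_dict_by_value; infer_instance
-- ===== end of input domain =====

-- B replaces A's single composite-key sort by value-bucket grouping (distinct values sorted
-- descending, keys sorted ascending inside each bucket); an alternative decomposition.

-- ===== PORT A =====
-- A: dict comprehension over sorted(input_dict.items(), key=lambda item: (-item[1], item[0]))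
def sort_dict_by_value (input_dict : List (String × Int)) : List (String × Int) :=
  (PySem.Dict.ofList (PySem.List.sorted2 (PySem.Dict.ofList input_dict).items
      (fun item => -item.2) (fun item => item.1))).items

-- ===== PORT B =====
-- B: group keys by value into buckets, then emit buckets by value descending, keys ascending.
def sort_dict_by_value_alt (input_dict : List (String × Int)) : List (String × Int) :=
  let items := (PySem.Dict.ofList input_dict).items
  let buckets := items.foldl (fun d kv => d.modify kv.2 [] (fun ks => ks ++ [kv.1])) PySem.Dict.empty
  let out := (PySem.List.sorted buckets.keys (fun v => v) true).foldl
      (fun d v => (PySem.List.sorted (buckets.getD v []) (fun k => k)).foldl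
        (fun d k => d.insert k v) d) PySem.Dict.empty
  out.items

-- ===== PRECONDITION & SPEC =====
def Spec_sort_dict_by_value (input_dict : List (String × Int)) (out : List (String × Int)) : Prop := out = sort_dict_by_value_alt input_dict
instance (input_dict : List (String × Int)) (out : List (String × Int)) : Decidable (Spec_sort_dict_by_value input_dict out) := by unfold Spec_sort_dict_by_value; infer_instance

-- ===== CLAIM (what is proved, stated in full; the proofs are below) =====
def Claim_equal_sort_dict_by_value : Prop := ∀ (input_dict : List (String × Int)), Dom_sort_dict_by_value input_dict → Spec_sort_dict_by_value input_dict (sort_dict_by_value input_dict)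

-- ===== LEMMAS AND PROOFS =====

-- A's tuple key (-value, key) is the lexicographic key into Lex (Int × String)
theorem pv_sorted2_lex (xs : List (String × Int)) :
    PySem.List.sorted2 xs (fun p => -p.2) (fun p => p.1)
      = PySem.List.sorted xs (fun p => toLex (-p.2, p.1)) := by
  have hb : (fun (a b : String × Int) => decide ((-a.2:Int) < -b.2) || (!decide ((-b.2:Int) < -a.2) && decide (a.1 < b.1)))
      = (fun (a b : String × Int) => decide ((toLex (-a.2, a.1) : Lex (Int × String)) < toLex (-b.2, b.1))) := by
    funext a b
    simp only [Prod.Lex.toLex_lt_toLex]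
    by_cases h1 : (-a.2 : Int) < -b.2 <;> by_cases h2 : (-b.2 : Int) < -a.2 <;>
      by_cases h3 : a.1 < b.1 <;> simp [h1, h2, h3] <;> omega
  simp only [PySem.List.sorted2, PySem.List.sorted, Bool.false_eq_true, ite_false, hb]

theorem pv_sorted_strict_of_nodup {κ : Type} [LinearOrder κ] (l : List κ) (h : l.Nodup) :
    (PySem.List.sorted l (fun k => k)).Pairwise (· < ·) := by
  have h1 := PySem.List.sorted_pairwise l (fun k => k)
  have h2 : (PySem.List.sorted l (fun k => k)).Nodup :=
    (PySem.List.sorted_perm l (fun k => k) false).symm.nodup h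
  exact (h1.and h2).imp (fun hab => lt_of_le_of_ne hab.1 hab.2)

theorem pv_sorted_rev_strict_of_nodup {κ : Type} [LinearOrder κ] (l : List κ) (h : l.Nodup) :
    (PySem.List.sorted l (fun k => k) true).Pairwise (· > ·) := by
  have h1 := PySem.List.sorted_pairwise_rev l (fun k => k)
  have h2 : (PySem.List.sorted l (fun k => k) true).Nodup :=
    (PySem.List.sorted_perm l (fun k => k) true).symm.nodup h
  exact (h1.and h2).imp (fun hab => lt_of_le_of_ne hab.1 hab.2.symm)

theorem pv_flatMap_perm_congr {α β : Type} (vs : List α) (f f' : α → List β)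
    (h : ∀ v ∈ vs, (f v).Perm (f' v)) : (vs.flatMap f).Perm (vs.flatMap f') := by
  induction vs with
  | nil => simp
  | cons v vs ih =>
    simp only [List.flatMap_cons]
    exact (h v (by simp)).append (ih (fun v' hv' => h v' (by simp [hv'])))

-- distributing a list over the distinct values of its second components is a permutation
theorem pv_flatMap_filter_perm (vs : List Int) (xs : List (String × Int)) (hnd : vs.Nodup)
    (hall : ∀ p ∈ xs, p.2 ∈ vs) :
    (vs.flatMap (fun v => xs.filter (fun p => p.2 == v))).Perm xs := by
  induction vs generalizing xs with
  | nil =>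
    have : xs = [] := by
      cases xs with
      | nil => rfl
      | cons p t => exact absurd (hall p (by simp)) (by simp)
    simp [this]
  | cons v vs ih =>
    simp only [List.flatMap_cons]
    have heq : vs.flatMap (fun v' => xs.filter (fun p => p.2 == v'))
        = vs.flatMap (fun v' => (xs.filter (fun p => !(p.2 == v))).filter (fun p => p.2 == v')) := by
      refine List.flatMap_congr (fun v' hv' => ?_)
      rw [List.filter_filter]
      refine (List.filter_congr (fun p _ => ?_)).symm
      by_cases h : p.2 = v'
      · have : v' ≠ v := by rintro rfl; exact (List.nodup_cons.mp hnd).1 hv'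
        simp [h, this]
      · simp [h]
    rw [heq]
    have hperm := ih (xs.filter (fun p => !(p.2 == v))) (List.nodup_cons.mp hnd).2
      (fun p hp => by
        have h1 := List.mem_filter.mp hp
        have h2 := hall p h1.1
        simp only [List.mem_cons] at h2
        rcases h2 with h2 | h2
        · simp [h2] at h1
        · exact h2)
    exact ((List.Perm.append_left _ hperm).trans (List.filter_append_perm _ xs))

theorem pv_ofList_items (l : List (String × Int)) (hnd : (l.map (fun p => p.1)).Nodup) :
    (PySem.Dict.ofList l).items = l := by
  have h := PySem.Dict.items_foldl_insert_fresh l (fun p => p.1) (fun p => p.2)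
    PySem.Dict.empty (fun a _ => by simp [PySem.Dict.contains_empty]) hnd
  simpa [PySem.Dict.ofList, PySem.Dict.update] using h

-- the grouped list both ports compute
def pvYs (xs : List (String × Int)) : List (String × Int) :=
  (PySem.List.sorted (PySem.Set.ofList (xs.map (fun p => p.2))) (fun v => v) true).flatMap
    (fun v => (PySem.List.sorted ((xs.filter (fun p => p.2 == v)).map (fun p => p.1)) (fun k => k)).map
      (fun k => (k, v)))

theorem pv_ys_perm (xs : List (String × Int)) : (pvYs xs).Perm xs := by
  unfold pvYs
  have h1 : ∀ v ∈ (PySem.List.sorted (PySem.Set.ofList (xs.map (fun p => p.2))) (fun v => v) true),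
      ((PySem.List.sorted ((xs.filter (fun p => p.2 == v)).map (fun p => p.1)) (fun k => k)).map
        (fun k => (k, v))).Perm (xs.filter (fun p => p.2 == v)) := by
    intro v _
    have hp : ((PySem.List.sorted ((xs.filter (fun p => p.2 == v)).map (fun p => p.1)) (fun k => k)).map
        (fun k => (k, v))).Perm (((xs.filter (fun p => p.2 == v)).map (fun p => p.1)).map (fun k => (k, v))) :=
      (PySem.List.sorted_perm _ _ false).map _
    refine hp.trans ?_
    rw [List.map_map]
    have : (xs.filter (fun p => p.2 == v)).map ((fun k => (k, v)) ∘ (fun p => p.1))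
        = xs.filter (fun p => p.2 == v) := by
      conv_rhs => rw [show xs.filter (fun p => p.2 == v) = (xs.filter (fun p => p.2 == v)).map id from (List.map_id _).symm]
      refine List.map_congr_left (fun p hp => ?_)
      have hv : p.2 = v := by simpa using (List.mem_filter.mp hp).2
      simp [Function.comp, ← hv]
    rw [this]
  refine (pv_flatMap_perm_congr _ _ _ h1).trans ?_
  refine pv_flatMap_filter_perm _ xs ?_ ?_
  · exact ((PySem.List.sorted_perm _ _ true).symm.nodup (PySem.Set.nodup_ofList _))
  · intro p hp
    rw [(PySem.List.sorted_perm _ _ true).mem_iff, PySem.Set.mem_ofList]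
    exact List.mem_map_of_mem hp

theorem pv_ys_pairwise (xs : List (String × Int)) (hk : (xs.map (fun p => p.1)).Nodup) :
    (pvYs xs).Pairwise (fun a b => (toLex (-a.2, a.1) : Lex (Int × String)) < toLex (-b.2, b.1)) := by
  unfold pvYs
  rw [List.flatMap_def, List.pairwise_flatten]
  constructor
  · intro l hl
    rw [List.mem_map] at hl
    obtain ⟨v, _, rfl⟩ := hl
    rw [List.pairwise_map]
    have hnd : ((xs.filter (fun p => p.2 == v)).map (fun p => p.1)).Nodup := by
      exact hk.sublist ((List.filter_sublist (l := xs)).map (fun p => p.1))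
    refine (pv_sorted_strict_of_nodup _ hnd).imp (fun {a b} hab => ?_)
    simp [Prod.Lex.toLex_lt_toLex, hab]
  · rw [List.pairwise_map]
    refine (pv_sorted_rev_strict_of_nodup _ (PySem.Set.nodup_ofList _)).imp ?_
    intro v1 v2 hgt x hx y hy
    rw [List.mem_map] at hx hy
    obtain ⟨k1, _, rfl⟩ := hx
    obtain ⟨k2, _, rfl⟩ := hy
    simp only [Prod.Lex.toLex_lt_toLex]
    left
    simp only [gt_iff_lt] at hgt
    omega

theorem pv_A_eq_ys (xs : List (String × Int)) (hk : (xs.map (fun p => p.1)).Nodup) :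
    PySem.List.sorted2 xs (fun p => -p.2) (fun p => p.1) = pvYs xs := by
  rw [pv_sorted2_lex]
  exact PySem.List.sorted_eq_of_perm_of_pairwise_lt xs (pvYs xs) _ (pv_ys_perm xs) (pv_ys_pairwise xs hk)

theorem pv_B_eq_ys (xs : List (String × Int)) (hk : (xs.map (fun p => p.1)).Nodup) :
    ((PySem.List.sorted (xs.foldl (fun d kv => d.modify kv.2 [] (fun ks => ks ++ [kv.1])) PySem.Dict.empty).keys (fun v => v) true).foldl
      (fun d v => (PySem.List.sorted ((xs.foldl (fun d kv => d.modify kv.2 [] (fun ks => ks ++ [kv.1])) PySem.Dict.empty).getD v []) (fun k => k)).foldl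
        (fun d k => d.insert k v) d) PySem.Dict.empty).items = pvYs xs := by
  have hswap : xs.foldl (fun d kv => d.modify kv.2 [] (fun ks => ks ++ [kv.1])) PySem.Dict.empty
      = (xs.map Prod.swap).foldl (fun d p => d.modify p.1 [] (fun ks => ks ++ [p.2])) PySem.Dict.empty := by
    rw [List.foldl_map]
    rfl
  have hkeys : (xs.foldl (fun d kv => d.modify kv.2 [] (fun ks => ks ++ [kv.1])) PySem.Dict.empty).keys
      = PySem.Set.ofList (xs.map (fun p => p.2)) := by
    rw [PySem.Dict.keys_foldl_modify_key xs (fun kv => kv.2) [] (fun d kv => fun ks => ks ++ [kv.1]) PySem.Dict.empty]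
    rfl
  have hgetD : ∀ v, (xs.foldl (fun d kv => d.modify kv.2 [] (fun ks => ks ++ [kv.1])) PySem.Dict.empty).getD v []
      = (xs.filter (fun p => p.2 == v)).map (fun p => p.1) := by
    intro v
    rw [hswap, PySem.Dict.getD_foldl_modify_append]
    simp only [List.filter_map, List.map_map]
    rfl
  rw [hkeys]
  simp only [hgetD]
  have hfold : ((PySem.List.sorted (PySem.Set.ofList (xs.map (fun p => p.2))) (fun v => v) true).foldl
      (fun d v => (PySem.List.sorted ((xs.filter (fun p => p.2 == v)).map (fun p => p.1)) (fun k => k)).foldl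
        (fun d k => d.insert k v) d) PySem.Dict.empty)
      = (pvYs xs).foldl (fun d p => d.insert p.1 p.2) PySem.Dict.empty := by
    unfold pvYs
    rw [List.flatMap_def, List.foldl_flatten, List.foldl_map]
    simp only [List.foldl_map]
  rw [hfold]
  have hnd : ((pvYs xs).map (fun p => p.1)).Nodup := ((pv_ys_perm xs).map (fun p => p.1)).symm.nodup hk
  have h := PySem.Dict.items_foldl_insert_fresh (pvYs xs) (fun p => p.1) (fun p => p.2)
    PySem.Dict.empty (fun a _ => by simp [PySem.Dict.contains_empty]) hnd
  simpa using h

-- ===== VERDICT (by name: the statement is the Claim_ definition above) =====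
theorem sort_dict_by_value_spec : Claim_equal_sort_dict_by_value := by
  intro input_dict _
  unfold Spec_sort_dict_by_value sort_dict_by_value sort_dict_by_value_alt
  have hk : (((PySem.Dict.ofList input_dict).items).map (fun p => p.1)).Nodup := by
    have := PySem.Dict.nodup_keys_ofList input_dict
    simpa [PySem.Dict.keys] using this
  dsimp only
  rw [pv_A_eq_ys _ hk, pv_ofList_items _ (((pv_ys_perm _).map (fun p => p.1)).symm.nodup hk), pv_B_eq_ys _ hk]
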